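-- pv_equiv track=rewrite | github.com/spikedoanz/advent-of-code | 2023/day7.py | parse_hand2
-- ===== SOURCE A (Python) =====
-- from collections import Counter
--
-- def parse_hand2(line):
--
--     def changeJ(hand):
--         top = Counter(hand).most_common()
--         if len(top) == 1: return hand
--         hand = hand.replace('A', top[0][0]) if top[0][0] != 'A' else hand.replace('A', top[1][0])
--         return hand
--
--     translation_table = str.maketrans('AKQT98765432J', 'MLKJIHGFEDCBA')
--     line = line.split()[0].translate(translation_table) + " " + line.split()[1]
--     hand = line.split()[0] # order = A, K, Q, T, 9, 8, 7, 6, 5, 4, 3, 2, J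
--     cards = len(set(hand)) # order = M  L  K  J  I  H  G  F  E  D  C  B  A
--     if 'A' in hand:
--         cards = cards - 1
--         hand = changeJ(hand)
--         cards = 1 if cards == 0 else cards
--
--     if cards == 1:
--         return '6' + line
--     if cards == 2:
--         for _ in hand:
--             if hand.count(_) == 4:
--                 return '5' + line
--         return '4' + line
--     if cards == 3:
--         for _ in hand:
--             if hand.count(_) == 3:
--                 return '3' + line
--         return '2' + line
--     if cards == 4:
--         return '1' + line
--     return '0' + line
-- ===== SOURCE B (Python) =====
-- from collections import Counter
--
-- def parse_hand2(line):
--     toks = line.split()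
--     table = str.maketrans('AKQT98765432J', 'MLKJIHGFEDCBA')
--     hand = toks[0].translate(table)
--     line = hand + " " + toks[1]
--     cnt = Counter(hand)
--     jokers = cnt.pop('A', 0)          # 'A' here is the translated joker 'J'
--     vals = sorted(cnt.values(), reverse=True)
--     if not vals:
--         vals = [jokers]               # hand was all jokers
--     else:
--         vals[0] += jokers             # jokers join a maximal count
--     if len(vals) == 1:
--         rank = '6'
--     elif len(vals) == 2:
--         rank = '5' if 4 in vals else '4'
--     elif len(vals) == 3:
--         rank = '3' if 3 in vals else '2'
--     elif len(vals) == 4: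
--         rank = '1'
--     else:
--         rank = '0'
--     return rank + line
-- ===== Notes on version B (the rewrite author's own statement) =====
-- stated objective: idiomatic
-- what changed: A classifies by distinct-card count plus a replace-then-rescan joker merge (changeJ rewrites the hand string via Counter.most_common and re-counts characters); B never rewrites the hand: it builds one Counter, pops the joker count, adds it onto the maximal remaining count, and classifies directly from the sorted count shape.
import Mathlib
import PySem

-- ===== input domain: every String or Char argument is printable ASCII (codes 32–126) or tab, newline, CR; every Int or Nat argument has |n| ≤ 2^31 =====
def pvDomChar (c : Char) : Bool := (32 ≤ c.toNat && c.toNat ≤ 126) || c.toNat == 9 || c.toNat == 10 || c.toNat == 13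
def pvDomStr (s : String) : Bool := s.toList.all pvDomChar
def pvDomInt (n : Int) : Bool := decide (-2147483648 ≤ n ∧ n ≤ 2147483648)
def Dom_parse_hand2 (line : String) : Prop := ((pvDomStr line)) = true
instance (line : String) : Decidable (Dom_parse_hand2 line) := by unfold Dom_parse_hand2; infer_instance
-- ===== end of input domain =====

-- B replaces A's replace-then-rescan joker merge (changeJ) and distinct-count classification by a
-- single Counter whose joker count is added onto a maximal remaining count, classifying the sorted
-- count shape directly; idiomatic rewrite, same results.

-- ===== PORT A =====

-- str.maketrans('AKQT98765432J', 'MLKJIHGFEDCBA'); .translate is a per-char map (shared by both ports)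
def pvTransChar (c : Char) : Char :=
  if c = 'A' then 'M' else if c = 'K' then 'L' else if c = 'Q' then 'K'
  else if c = 'T' then 'J' else if c = '9' then 'I' else if c = '8' then 'H'
  else if c = '7' then 'G' else if c = '6' then 'F' else if c = '5' then 'E'
  else if c = '4' then 'D' else if c = '3' then 'C' else if c = '2' then 'B'
  else if c = 'J' then 'A' else c

-- A's inner changeJ; Counter(hand).most_common() = sorted(items, key=count, reverse=True)
def pvChangeJ (hand : List Char) : List Char :=
  let top := PySem.List.sorted (PySem.Dict.counter hand).items (fun p => p.2) true
  if top.length = 1 then hand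
  else
    let t0 := ((PySem.List.pyGet? top 0).getD ('A', 0)).1
    if t0 ≠ 'A' then PySem.Chars.replace hand ['A'] [t0]
    else PySem.Chars.replace hand ['A'] [((PySem.List.pyGet? top 1).getD ('A', 0)).1]

def parse_hand2 (line : String) : String :=
  let toks := PySem.Chars.split₀ line.toList
  let line2 := (toks.getD 0 []).map pvTransChar ++ [' '] ++ toks.getD 1 []
  let hand0 := (PySem.Chars.split₀ line2).getD 0 []
  let cards0 := (PySem.Set.ofList hand0).length
  let p :=
    if PySem.Chars.isIn ['A'] hand0 then
      (pvChangeJ hand0, if cards0 - 1 = 0 then 1 else cards0 - 1)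
    else (hand0, cards0)
  let hand := p.1
  let cards := p.2
  if cards = 1 then String.ofList ('6' :: line2)
  else if cards = 2 then
    if hand.any (fun c => hand.count c == 4) then String.ofList ('5' :: line2)
    else String.ofList ('4' :: line2)
  else if cards = 3 then
    if hand.any (fun c => hand.count c == 3) then String.ofList ('3' :: line2)
    else String.ofList ('2' :: line2)
  else if cards = 4 then String.ofList ('1' :: line2)
  else String.ofList ('0' :: line2)

-- ===== PORT B =====
def parse_hand2_alt (line : String) : String :=
  let toks := PySem.Chars.split₀ line.toList
  let hand := (toks.getD 0 []).map pvTransChar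
  let line2 := hand ++ [' '] ++ toks.getD 1 []
  let cnt := PySem.Dict.counter hand
  let jokers := cnt.getD 'A' 0
  let vals0 := PySem.List.sorted (cnt.erase 'A').values (fun v => v) true
  let vals := if vals0.isEmpty then [jokers]
    else (vals0.headD 0 + jokers) :: vals0.tail
  let rank :=
    if vals.length = 1 then '6'
    else if vals.length = 2 then (if (4 : Int) ∈ vals then '5' else '4')
    else if vals.length = 3 then (if (3 : Int) ∈ vals then '3' else '2')
    else if vals.length = 4 then '1'
    else '0'
  String.ofList (rank :: line2)

-- ===== PRECONDITION & SPEC =====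
-- A raises IndexError (line.split()[1]) when the line has fewer than two whitespace-separated tokens.
def Pre_parse_hand2 (line : String) : Prop := 2 ≤ (PySem.Chars.split₀ line.toList).length
instance (line : String) : Decidable (Pre_parse_hand2 line) := by unfold Pre_parse_hand2; infer_instance
def pvWitness_parse_hand2 : String := "32T3K 765"

def Spec_parse_hand2 (line : String) (out : String) : Prop := out = parse_hand2_alt line
instance (line : String) (out : String) : Decidable (Spec_parse_hand2 line out) := by unfold Spec_parse_hand2; infer_instance

-- ===== CLAIM (what is proved, stated in full; the proofs are below) =====
def Claim_equal_parse_hand2 : Prop := ∀ (line : String), Dom_parse_hand2 line → Pre_parse_hand2 line → Spec_parse_hand2 line (parse_hand2 line)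

-- ===== LEMMAS AND PROOFS =====
-- tokens of split₀ are nonempty and whitespace-free
theorem pv_go_acc (s : List Char) : ∀ cur acc, PySem.Chars.split₀.go s cur acc = acc.reverse ++ PySem.Chars.split₀.go s cur [] := by
  induction s with
  | nil => intro cur acc; simp [PySem.Chars.split₀.go]; split <;> simp
  | cons c t ih =>
    intro cur acc
    simp only [PySem.Chars.split₀.go]
    split
    · split
      · exact ih [] acc
      · rw [ih [] (cur.reverse :: acc), ih [] [cur.reverse]]; simp
    · exact ih (c :: cur) acc

theorem pv_go_token (a : List Char) (ha : ∀ c ∈ a, PySem.Chars.isspace c = false) :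
    ∀ s cur acc, PySem.Chars.split₀.go (a ++ s) cur acc = PySem.Chars.split₀.go s (a.reverse ++ cur) acc := by
  induction a with
  | nil => simp
  | cons c t ih =>
    intro s cur acc
    simp only [List.cons_append, PySem.Chars.split₀.go, ha c (by simp)]
    rw [ih (fun x hx => ha x (by simp [hx])) s (c :: cur) acc]
    simp

theorem pv_split₀_one (t : List Char) (tne : t ≠ []) (tws : ∀ c ∈ t, PySem.Chars.isspace c = false) :
    PySem.Chars.split₀ t = [t] := by
  unfold PySem.Chars.split₀
  rw [show t = t ++ [] by simp, pv_go_token t tws [] [] []]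
  simp [PySem.Chars.split₀.go, List.isEmpty_iff, tne]

theorem pv_split₀_two (h t : List Char) (hne : h ≠ []) (tne : t ≠ [])
    (hws : ∀ c ∈ h, PySem.Chars.isspace c = false) (tws : ∀ c ∈ t, PySem.Chars.isspace c = false) :
    PySem.Chars.split₀ (h ++ ' ' :: t) = [h, t] := by
  unfold PySem.Chars.split₀
  rw [pv_go_token h hws (' ' :: t) [] []]
  rw [List.append_nil]
  simp only [PySem.Chars.split₀.go, show PySem.Chars.isspace ' ' = true from by decide, if_pos]
  rw [if_neg (by simpa [List.isEmpty_iff] using hne), pv_go_acc]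
  have := pv_split₀_one t tne tws
  unfold PySem.Chars.split₀ at this
  simp [this]

theorem pv_split₀_tokens (s : List Char) : ∀ u ∈ PySem.Chars.split₀ s, u ≠ [] ∧ ∀ c ∈ u, PySem.Chars.isspace c = false := by
  suffices H : ∀ s cur acc, (∀ c ∈ cur, PySem.Chars.isspace c = false) →
      (∀ u ∈ acc, u ≠ [] ∧ ∀ c ∈ u, PySem.Chars.isspace c = false) →
      ∀ u ∈ PySem.Chars.split₀.go s cur acc, u ≠ [] ∧ ∀ c ∈ u, PySem.Chars.isspace c = false by
    exact H s [] [] (by simp) (by simp)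
  intro s
  induction s with
  | nil =>
    intro cur acc hcur hacc u hu
    simp only [PySem.Chars.split₀.go] at hu
    split at hu
    · exact hacc u (by simpa using hu)
    · rename_i hc
      simp only [List.mem_reverse, List.mem_cons] at hu
      rcases hu with rfl | hu
      · constructor
        · simpa [List.isEmpty_iff] using hc
        · intro c hc'; exact hcur c (by simpa using hc')
      · exact hacc u hu
  | cons c t ih =>
    intro cur acc hcur hacc u hu
    simp only [PySem.Chars.split₀.go] at hu
    split at hu
    · split at hu
      · exact ih [] acc (by simp) hacc u hu
      · rename_i hc
        refine ih [] (cur.reverse :: acc) (by simp) ?_ u hu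
        intro v hv
        rcases List.mem_cons.mp hv with rfl | hv
        · exact ⟨by simpa [List.isEmpty_iff] using hc, fun x hx => hcur x (by simpa using hx)⟩
        · exact hacc v hv
    · rename_i hc
      refine ih (c :: cur) acc ?_ hacc u hu
      intro x hx
      rcases List.mem_cons.mp hx with rfl | hx
      · simpa using hc
      · exact hcur x hx

set_option maxHeartbeats 1000000 in
theorem pvTransChar_ws (c : Char) (hc : PySem.Chars.isspace c = false) :
    PySem.Chars.isspace (pvTransChar c) = false := by
  unfold pvTransChar
  split_ifs <;> first | decide | exact hc

-- s.replace('A', c) for one-char pattern and replacement is a character map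
theorem pv_replace_go_single (a b : Char) :
    ∀ (fuel : Nat) (l : List Char) (acc : List Char), l.length ≤ fuel →
      PySem.Chars.replace.go [a] [b] fuel l acc = acc.reverse ++ l.map (fun x => if x = a then b else x) := by
  intro fuel
  induction fuel with
  | zero => intro l acc h; simp at h; simp [h, PySem.Chars.replace.go]
  | succ n ih =>
    intro l acc h
    cases l with
    | nil => simp [PySem.Chars.replace.go]
    | cons c t =>
      simp only [PySem.Chars.replace.go, List.isPrefixOf, Bool.and_true]
      by_cases hc : c = a
      · rw [if_pos (by simp [hc]), show List.drop [a].length (c :: t) = t from rfl,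
          ih t _ (by simpa using h)]
        simp [hc]
      · rw [if_neg (by simp [Ne.symm hc]), ih t _ (by simpa using h)]
        simp [hc]

theorem pv_replace_single (s : List Char) (a b : Char) :
    PySem.Chars.replace s [a] [b] = s.map (fun x => if x = a then b else x) := by
  unfold PySem.Chars.replace
  simp [pv_replace_go_single a b s.length s [] le_rfl]

-- counts after merging the jokers into c
set_option maxHeartbeats 1000000 in
theorem pv_count_map_subst (h : List Char) (c : Char) (hc : c ≠ 'A') (x : Char) :
    (h.map (fun y => if y = 'A' then c else y)).count x =
      if x = 'A' then 0 else if x = c then h.count c + h.count 'A' else h.count x := by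
  induction h with
  | nil => simp
  | cons a t ih =>
    simp only [List.map_cons, List.count_cons, ih]
    split_ifs <;> simp_all [beq_iff_eq] <;> first | omega | (subst_vars; simp_all)

theorem pv_mem_map_subst (h : List Char) (c : Char) (hc : c ≠ 'A') (hch : c ∈ h) (x : Char) :
    x ∈ h.map (fun y => if y = 'A' then c else y) ↔ (x ∈ h ∧ x ≠ 'A') := by
  constructor
  · intro hx
    obtain ⟨y, hy, hyx⟩ := List.mem_map.mp hx
    by_cases hyA : y = 'A'
    · simp only [hyA, if_pos] at hyx
      subst hyx; exact ⟨hch, hc⟩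
    · simp only [if_neg hyA] at hyx
      subst hyx; exact ⟨hy, hyA⟩
  · rintro ⟨hx, hxA⟩
    exact List.mem_map.mpr ⟨x, hx, by simp [hxA]⟩


theorem pv_changeJ_id (h : List Char) (h1 : (PySem.Set.ofList h).length = 1) : pvChangeJ h = h := by
  unfold pvChangeJ
  rw [if_pos]
  rw [PySem.List.length_sorted, PySem.Dict.items_counter, List.length_map, h1]
theorem pv_changeJ_spec (h : List Char) (h2 : 2 ≤ (PySem.Set.ofList h).length) :
    ∃ c, c ≠ 'A' ∧ c ∈ h ∧ (∀ x ∈ h, x ≠ 'A' → h.count x ≤ h.count c) ∧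
      pvChangeJ h = h.map (fun x => if x = 'A' then c else x) := by
  unfold pvChangeJ
  have hitems := PySem.Dict.items_counter h
  have hlen : (PySem.List.sorted (PySem.Dict.counter h).items (fun p => p.2) true).length
      = (PySem.Set.ofList h).length := by
    rw [PySem.List.length_sorted, hitems, List.length_map]
  have hperm : (PySem.List.sorted (PySem.Dict.counter h).items (fun p => p.2) true).Perm
      (PySem.Dict.counter h).items := PySem.List.sorted_perm _ _ _
  have hpair := PySem.List.sorted_pairwise_rev (PySem.Dict.counter h).items (fun p => p.2)
  rcases htop : PySem.List.sorted (PySem.Dict.counter h).items (fun p => p.2) true with _ | ⟨p0, _ | ⟨p1, t⟩⟩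
  · rw [htop] at hlen; simp at hlen; omega
  · rw [htop] at hlen; simp at hlen; omega
  rw [htop] at hperm hpair
  -- shape of items entries
  have hshape : ∀ q ∈ (PySem.Dict.counter h).items, q.1 ∈ h ∧ q.2 = (h.count q.1 : Int) := by
    intro q hq
    rw [hitems] at hq
    obtain ⟨k, hk, rfl⟩ := List.mem_map.mp hq
    exact ⟨(PySem.Set.mem_ofList _ _).mp hk, by simp [List.count]⟩
  have hmax : ∀ q ∈ (PySem.Dict.counter h).items, q.2 ≤ p0.2 :=
    PySem.List.key_head_sorted_rev_ge _ (fun p : Char × Int => p.2) htop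
  have hp0 : p0 ∈ (PySem.Dict.counter h).items := hperm.mem_iff.mp (by simp)
  have hp1 : p1 ∈ (PySem.Dict.counter h).items := hperm.mem_iff.mp (by simp)
  have hmem : ∀ x ∈ h, (x, (h.count x : Int)) ∈ (PySem.Dict.counter h).items := by
    intro x hx
    rw [hitems]
    exact List.mem_map.mpr ⟨x, (PySem.Set.mem_ofList _ _).mpr hx, by simp [List.count]⟩
  simp only [List.length_cons, if_neg (by omega : ¬ t.length + 1 + 1 = 1)]
  have hget0 : ((PySem.List.pyGet? (p0 :: p1 :: t) 0).getD ('A', 0)).1 = p0.1 := by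
    have h0 : (0:Int) ≤ (t.length:Int) + 1 := by positivity
    simp [PySem.List.pyGet?, PySem.List.pyIdx?, h0]
  rw [hget0]
  by_cases hp0A : p0.1 = 'A'
  · -- jokers are the most common card: merge into the runner-up p1
    rw [if_neg (by simp [hp0A])]
    have hget1 : ((PySem.List.pyGet? (p0 :: p1 :: t) 1).getD ('A', 0)).1 = p1.1 := by
      simp [PySem.List.pyGet?, PySem.List.pyIdx?]
    rw [hget1, pv_replace_single]
    refine ⟨p1.1, ?_, (hshape p1 hp1).1, ?_, rfl⟩
    · -- keys are distinct
      have hnd : ((p0 :: p1 :: t).map Prod.fst).Nodup := by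
        refine ((hperm.map Prod.fst).symm).nodup ?_
        rw [hitems, List.map_map]
        have : (Prod.fst ∘ fun k => (k, (h.count k : Int))) = id := by funext k; simp [List.count]
        rw [this, List.map_id]
        exact PySem.Set.nodup_ofList h
      intro hp1A
      simp [List.nodup_cons, hp0A, hp1A] at hnd
    · -- p1 has the maximal count among non-joker cards
      intro x hx hxA
      have hq : (x, (h.count x : Int)) ∈ p0 :: p1 :: t := hperm.mem_iff.mpr (hmem x hx)
      have hq' : (x, (h.count x : Int)) ∈ p1 :: t := by
        rcases List.mem_cons.mp hq with heq | hq
        · exact absurd (congrArg Prod.fst heq) (by simpa [hp0A] using hxA)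
        · exact hq
      have hle : (h.count x : Int) ≤ p1.2 := by
        rcases List.mem_cons.mp hq' with heq | hq''
        · rw [← heq]
        · exact (List.pairwise_cons.mp (List.pairwise_cons.mp hpair).2).1 _ hq''
      rw [(hshape p1 hp1).2] at hle
      exact_mod_cast hle
  · -- p0 is already a non-joker card with maximal count
    rw [if_pos hp0A, pv_replace_single]
    refine ⟨p0.1, hp0A, (hshape p0 hp0).1, ?_, rfl⟩
    intro x hx hxA
    have hle : (h.count x : Int) ≤ p0.2 := hmax _ (hmem x hx)
    rw [(hshape p0 hp0).2] at hle
    exact_mod_cast hle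

theorem pv_erase_values (h : List Char) :
    ((PySem.Dict.counter h).erase 'A').values
      = ((PySem.Set.ofList h).filter (fun k => !(k == 'A'))).map (fun k => (h.count k : Int)) := by
  show ((PySem.Dict.counter h).items.filter (fun p => !(p.1 == 'A'))).map Prod.snd = _
  rw [PySem.Dict.items_counter, List.filter_map, List.map_map]
  rfl

theorem pv_bridge (h : List Char) (hne : h ≠ []) :
    ∃ (hand' : List Char) (vals : List Int),
      (if PySem.Chars.isIn ['A'] h = true then
          (pvChangeJ h, if (PySem.Set.ofList h).length - 1 = 0 then 1 else (PySem.Set.ofList h).length - 1)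
        else (h, (PySem.Set.ofList h).length)) = (hand', vals.length)
      ∧ (if (PySem.List.sorted ((PySem.Dict.counter h).erase 'A').values (fun v => v) true).isEmpty = true
           then [(PySem.Dict.counter h).getD 'A' 0]
           else ((PySem.List.sorted ((PySem.Dict.counter h).erase 'A').values (fun v => v) true).headD 0
                  + (PySem.Dict.counter h).getD 'A' 0)
                :: (PySem.List.sorted ((PySem.Dict.counter h).erase 'A').values (fun v => v) true).tail) = vals
      ∧ ∀ n : Nat, ((hand'.any fun c => hand'.count c == n) = true ↔ (n : Int) ∈ vals) := by
  have hDnd : (PySem.Set.ofList h).Nodup := PySem.Set.nodup_ofList h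
  have hmemD : ∀ x, x ∈ PySem.Set.ofList h ↔ x ∈ h := fun x => PySem.Set.mem_ofList h x
  have hisIn : PySem.Chars.isIn ['A'] h = true ↔ 'A' ∈ h := by
    rw [PySem.Chars.isIn_iff_infix, List.singleton_infix_iff]
  have hDlen : 1 ≤ (PySem.Set.ofList h).length := by
    rcases h with _ | ⟨a, t⟩
    · exact absurd rfl hne
    · have : a ∈ PySem.Set.ofList (a :: t) := (hmemD a).mpr (by simp)
      exact List.length_pos_of_mem this
  have hanymem : ∀ (g : List Char) (n : Nat),
      ((g.any fun c => g.count c == n) = true ↔ ∃ x ∈ g, g.count x = n) := by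
    intro g n; simp [List.any_eq_true]
  rw [pv_erase_values]
  by_cases hA : 'A' ∈ h
  · by_cases h1 : (PySem.Set.ofList h).length = 1
    · -- the hand is all jokers
      have hDA : PySem.Set.ofList h = ['A'] := by
        have hAD : 'A' ∈ PySem.Set.ofList h := (hmemD 'A').mpr hA
        rcases hD : PySem.Set.ofList h with _ | ⟨d, ds⟩
        · rw [hD] at hAD; simp at hAD
        · rw [hD] at h1 hAD
          have hds : ds = [] := by
            simp only [List.length_cons] at h1
            exact List.length_eq_zero_iff.mp (by omega)
          subst hds
          simp at hAD
          rw [hAD]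
      have hallA : ∀ x ∈ h, x = 'A' := by
        intro x hx
        have hxD : x ∈ PySem.Set.ofList h := (hmemD x).mpr hx
        rw [hDA] at hxD; simpa using hxD
      rw [if_pos (hisIn.mpr hA), pv_changeJ_id h h1, h1, hDA]
      refine ⟨h, [((h.count 'A' : Int))], by simp, ?_, ?_⟩
      · simp [PySem.List.sorted, PySem.Dict.getD_counter]
      · intro n
        rw [hanymem]
        constructor
        · rintro ⟨x, hx, hcx⟩
          rw [hallA x hx] at hcx
          simp [← hcx]
        · intro hn
          simp only [List.mem_singleton] at hn
          rcases h with _ | ⟨a, t⟩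
          · exact absurd rfl hne
          · have ha : a = 'A' := hallA a (by simp)
            subst ha
            exact ⟨'A', by simp, by exact_mod_cast hn.symm⟩
    · -- at least two distinct cards besides nothing: merge jokers into a maximal card
      have h2 : 2 ≤ (PySem.Set.ofList h).length := by omega
      obtain ⟨c, hcA, hch, hcmax, hcJ⟩ := pv_changeJ_spec h h2
      have hAD : 'A' ∈ PySem.Set.ofList h := (hmemD 'A').mpr hA
      have hndnd : ((PySem.Set.ofList h).filter (fun k => !(k == 'A'))).Nodup := hDnd.filter _
      have hmemnd : ∀ x, x ∈ (PySem.Set.ofList h).filter (fun k => !(k == 'A')) ↔ (x ∈ h ∧ x ≠ 'A') := by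
        intro x
        simp [List.mem_filter, hmemD x]
      have hcnd : c ∈ (PySem.Set.ofList h).filter (fun k => !(k == 'A')) := (hmemnd c).mpr ⟨hch, hcA⟩
      have hnd_len : ((PySem.Set.ofList h).filter (fun k => !(k == 'A'))).length
          = (PySem.Set.ofList h).length - 1 := by
        have hpermD := List.perm_cons_erase hAD
        have := (hpermD.filter (fun k => !(k == 'A')))
        have hfe : ((PySem.Set.ofList h).erase 'A').filter (fun k => !(k == 'A'))
            = (PySem.Set.ofList h).erase 'A' := by
          refine List.filter_eq_self.mpr ?_
          intro a ha
          have := (hDnd.mem_erase_iff.mp ha).1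
          simpa using this
        rw [List.filter_cons_of_neg (by simp)] at this
        rw [this.length_eq, hfe, List.length_erase_of_mem hAD]
      -- B's sorted count list
      set nd := (PySem.Set.ofList h).filter (fun k => !(k == 'A')) with hnddef
      have hperm0 : (PySem.List.sorted (nd.map (fun k => (h.count k : Int))) (fun v => v) true).Perm
          (nd.map (fun k => (h.count k : Int))) := PySem.List.sorted_perm _ _ _
      rcases hv : PySem.List.sorted (nd.map (fun k => (h.count k : Int))) (fun v => v) true with _ | ⟨v0, rest⟩
      · rw [PySem.List.sorted_eq_nil_iff, List.map_eq_nil_iff] at hv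
        rw [hv] at hnd_len; simp at hnd_len; omega
      rw [hv] at hperm0
      have hv0 : v0 = (h.count c : Int) := by
        have hge := PySem.List.key_head_sorted_rev_ge (nd.map (fun k => (h.count k : Int))) (fun v : Int => v) hv
        have h1le : (h.count c : Int) ≤ v0 := hge _ (List.mem_map.mpr ⟨c, hcnd, rfl⟩)
        have h2le : v0 ≤ (h.count c : Int) := by
          obtain ⟨x0, hx0, hx0e⟩ := List.mem_map.mp (hperm0.mem_iff.mp (by simp : v0 ∈ v0 :: rest))
          rw [← hx0e]
          exact_mod_cast hcmax x0 ((hmemnd x0).mp hx0).1 ((hmemnd x0).mp hx0).2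
        omega
      -- A's merged hand counts, as a multiset over nd
      have hcnt := pv_count_map_subst h c hcA
      have hrest : rest.Perm ((nd.erase c).map (fun k => (h.count k : Int))) := by
        have hpC := (List.perm_cons_erase hcnd).map (fun k => (h.count k : Int))
        have := hperm0.trans hpC
        rw [hv0] at this
        exact this.cons_inv
      have hpermT : ((v0 + (h.count 'A' : Int)) :: rest).Perm
          (nd.map (fun x => ((h.map (fun y => if y = 'A' then c else y)).count x : Int))) := by
        have hpC := (List.perm_cons_erase hcnd).map (fun x => ((h.map (fun y => if y = 'A' then c else y)).count x : Int))
        have hmape : (nd.erase c).map (fun x => ((h.map (fun y => if y = 'A' then c else y)).count x : Int))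
            = (nd.erase c).map (fun k => (h.count k : Int)) := by
          refine List.map_eq_map_iff.mpr ?_
          intro x hx
          have hxc : x ≠ c := (hndnd.mem_erase_iff.mp hx).1
          have hxA : x ≠ 'A' := ((hmemnd x).mp (hndnd.mem_erase_iff.mp hx).2).2
          rw [hcnt x, if_neg hxA, if_neg hxc]
        have hhead : ((h.map (fun y => if y = 'A' then c else y)).count c : Int) = v0 + (h.count 'A' : Int) := by
          rw [hcnt c, if_neg hcA, if_pos rfl, hv0]
          push_cast; ring
        simp only [List.map_cons] at hpC
        rw [hmape, hhead] at hpC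
        exact (hrest.cons _).trans hpC.symm
      refine ⟨h.map (fun y => if y = 'A' then c else y), (v0 + (h.count 'A' : Int)) :: rest, ?_, ?_, ?_⟩
      · rw [if_pos (hisIn.mpr hA), hcJ]
        have : (PySem.Set.ofList h).length - 1 = rest.length + 1 := by
          have := hperm0.length_eq
          simp only [List.length_cons, List.length_map] at this
          omega
        simp only [List.length_cons, this]
        rw [if_neg (by omega)]
      · simp [PySem.Dict.getD_counter]
      · intro n
        rw [hanymem, hpermT.mem_iff]
        constructor
        · rintro ⟨x, hx, hcx⟩
          exact List.mem_map.mpr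
            ⟨x, (hmemnd x).mpr ((pv_mem_map_subst h c hcA hch x).mp hx), by exact_mod_cast congrArg Nat.cast hcx⟩
        · intro hmem
          obtain ⟨x, hx, hcx⟩ := List.mem_map.mp hmem
          exact ⟨x, (pv_mem_map_subst h c hcA hch x).mpr ((hmemnd x).mp hx), by exact_mod_cast hcx⟩
  · -- no joker in the hand
    have hjz : (PySem.Dict.counter h).getD 'A' 0 = 0 := by
      rw [PySem.Dict.getD_counter]
      simp [List.count_eq_zero.mpr hA]
    have hfilt : (PySem.Set.ofList h).filter (fun k => !(k == 'A')) = PySem.Set.ofList h := by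
      refine List.filter_eq_self.mpr ?_
      intro a ha
      simp only [Bool.not_eq_eq_eq_not, Bool.not_true, beq_eq_false_iff_ne, ne_eq]
      rintro rfl
      exact hA ((hmemD 'A').mp ha)
    rw [hfilt, if_neg (by simp [hisIn, hA]), hjz]
    have hperm : (PySem.List.sorted ((PySem.Set.ofList h).map (fun k => (h.count k : Int))) (fun v => v) true).Perm
        ((PySem.Set.ofList h).map (fun k => (h.count k : Int))) := PySem.List.sorted_perm _ _ _
    rcases hv : PySem.List.sorted ((PySem.Set.ofList h).map (fun k => (h.count k : Int))) (fun v => v) true with _ | ⟨v0, rest⟩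
    · rw [PySem.List.sorted_eq_nil_iff] at hv
      simp only [List.map_eq_nil_iff] at hv
      rw [hv] at hDlen; simp at hDlen
    · refine ⟨h, v0 :: rest, ?_, by simp, ?_⟩
      · have : (v0 :: rest).length = (PySem.Set.ofList h).length := by
          rw [← hv, PySem.List.length_sorted, List.length_map]
        simp [this]
      · intro n
        rw [hanymem]
        rw [hv] at hperm
        rw [hperm.mem_iff]
        simp only [List.mem_map]
        constructor
        · rintro ⟨x, hx, hcx⟩
          exact ⟨x, (hmemD x).mpr hx, by exact_mod_cast congrArg Nat.cast hcx⟩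
        · rintro ⟨x, hx, hcx⟩
          exact ⟨x, (hmemD x).mp hx, by exact_mod_cast hcx⟩

-- ===== VERDICT (by name: the statement is the Claim_ definition above) =====
theorem parse_hand2_spec : Claim_equal_parse_hand2 := by
  unfold Claim_equal_parse_hand2
  intro line _ hpre
  unfold Spec_parse_hand2
  unfold Pre_parse_hand2 at hpre
  rcases htoks : PySem.Chars.split₀ line.toList with _ | ⟨t0, _ | ⟨t1, rts⟩⟩
  · rw [htoks] at hpre; simp at hpre
  · rw [htoks] at hpre; simp at hpre
  have ht0 := pv_split₀_tokens line.toList t0 (htoks ▸ (by simp : t0 ∈ (t0 :: t1 :: rts)))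
  have hh_ne : t0.map pvTransChar ≠ [] := by
    simp only [ne_eq, List.map_eq_nil_iff]; exact ht0.1
  have hh_ws : ∀ c ∈ t0.map pvTransChar, PySem.Chars.isspace c = false := by
    intro c hc
    obtain ⟨y, hy, rfl⟩ := List.mem_map.mp hc
    exact pvTransChar_ws y (ht0.2 y hy)
  have ht1 := pv_split₀_tokens line.toList t1 (htoks ▸ (by simp : t1 ∈ (t0 :: t1 :: rts)))
  have hsp : PySem.Chars.split₀ (t0.map pvTransChar ++ [' '] ++ t1) = [t0.map pvTransChar, t1] := by
    rw [List.append_assoc, List.singleton_append]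
    exact pv_split₀_two _ _ hh_ne ht1.1 hh_ws ht1.2
  obtain ⟨hand', vals, hApair, hBvals, hmem⟩ := pv_bridge (t0.map pvTransChar) hh_ne
  have hmem4 : ((hand'.any fun c => hand'.count c == 4) = true ↔ (4 : Int) ∈ vals) := by
    have := hmem 4; norm_num at this ⊢; exact this
  have hmem3 : ((hand'.any fun c => hand'.count c == 3) = true ↔ (3 : Int) ∈ vals) := by
    have := hmem 3; norm_num at this ⊢; exact this
  simp only [parse_hand2, parse_hand2_alt, htoks, List.getD_cons_zero, List.getD_cons_succ, hsp]
  rw [hApair, hBvals]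
  simp only [hmem4, hmem3]
  split_ifs <;> rfl
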